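-- pv_equiv track=rewrite | github.com/oumi-ai/oumi | src/oumi/core/analyze/column_utils.py | get_analyzer_columns_by_source
-- ===== SOURCE A (Python) =====
-- from typing import NamedTuple
--
-- class AnalyzerColumnInfo(NamedTuple):
--     """Parsed information from an analyzer column name."""
--
--     source_column: str
--     """The original source column that was analyzed."""
--
--     analyzer_id: str
--     """The instance ID of the analyzer that generated this column.
--
--     This is the unique identifier for the analyzer instance, which may
--     differ from the analyzer type (e.g., 'response_quality' vs
--     'llm_judge').
--     """
--
--     metric_name: str
--     """The specific metric name for this column."""
--
-- def parse_analyzer_column_name(column_name: str) -> AnalyzerColumnInfo | None: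
--     """Parse an analyzer column name into its components.
--
--     Args:
--         column_name: Column name to parse.
--
--     Returns:
--         AnalyzerColumnInfo with source_column, analyzer_id (instance ID),
--         and metric_name, or None if the column name doesn't match the
--         analyzer format.
--
--     Examples:
--         >>> parse_analyzer_column_name('text_content__quality__has_pii')
--         AnalyzerColumnInfo(source_column='text_content', \
-- analyzer_id='quality', metric_name='has_pii')
--
--         >>> parse_analyzer_column_name(
--         ...     'text_content__response_quality__score'
--         ... )
--         AnalyzerColumnInfo(source_column='text_content', \
-- analyzer_id='response_quality', metric_name='score')
--
--         >>> parse_analyzer_column_name('regular_column')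
--         None
--     """
--     parts = column_name.split("__")
--     if len(parts) == 3:
--         return AnalyzerColumnInfo(
--             source_column=parts[0], analyzer_id=parts[1], metric_name=parts[2]
--         )
--     return None
--
-- def get_analyzer_columns_by_source(columns: list[str]) -> dict[str, list[str]]:
--     """Group analyzer columns by their source column.
--
--     Args:
--         columns: List of column names.
--
--     Returns:
--         Dictionary mapping source column name to list of analyzer columns.
--
--     Examples:
--         >>> cols = ['text_content__quality__has_pii', 'text_content__ifd__score',
--         ...         'other_col__length__count', 'regular_col']
--         >>> get_analyzer_columns_by_source(cols)
--         {'text_content': ['text_content__quality__has_pii', 'text_content__ifd__score'],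
--          'other_col': ['other_col__length__count']}
--     """
--     result: dict[str, list[str]] = {}
--     for col in columns:
--         info = parse_analyzer_column_name(col)
--         if info is not None:
--             if info.source_column not in result:
--                 result[info.source_column] = []
--             result[info.source_column].append(col)
--     return result
-- ===== SOURCE B (Python) =====
-- def get_analyzer_columns_by_source(columns):
--     """Group analyzer columns by source: filter-map once, dedup the sources
--     in first-occurrence order, then gather each group with a comprehension."""
--
--     def pair(c):
--         parts = c.split("__")
--         return (parts[0], c) if len(parts) == 3 else None
--
--     pairs = [p for c in columns if (p := pair(c)) is not None]
--     order = dict.fromkeys(s for s, _ in pairs)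
--     return {s: [c for t, c in pairs if t == s] for s in order}
-- ===== Notes on version B (the rewrite author's own statement) =====
-- stated objective: alternative
-- what changed: A builds the dict incrementally (membership test + append per element); B filter-maps the columns to (source, col) pairs once, computes the key order by an ordered dedup (dict.fromkeys), and gathers each group with a per-key comprehension.
import Mathlib
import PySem

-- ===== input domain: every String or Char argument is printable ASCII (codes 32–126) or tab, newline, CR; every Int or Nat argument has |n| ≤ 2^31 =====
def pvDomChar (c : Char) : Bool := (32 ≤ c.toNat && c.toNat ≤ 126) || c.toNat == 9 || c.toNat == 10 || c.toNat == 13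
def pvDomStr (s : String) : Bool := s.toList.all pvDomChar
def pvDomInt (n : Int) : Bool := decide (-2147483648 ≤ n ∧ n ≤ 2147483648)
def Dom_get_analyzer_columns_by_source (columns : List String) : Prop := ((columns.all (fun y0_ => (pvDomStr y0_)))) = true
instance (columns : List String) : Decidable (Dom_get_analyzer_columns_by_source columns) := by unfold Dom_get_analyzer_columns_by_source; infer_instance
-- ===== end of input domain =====

-- B replaces A's incremental dict build by: filter-map to (source, col) pairs, ordered dedup of
-- the sources, then gather each group with a comprehension (alternative decomposition, same cost).


-- ===== PORT A =====
-- parse_analyzer_column_name: split on "__", return the triple iff there are exactly 3 parts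
def pvParse (column_name : String) : Option (String × String × String) :=
  match PySem.Str.split? column_name "__" with
  | some [a, b, c] => some (a, b, c)
  | _ => none

-- A's loop body: if parsed, ensure the key exists (with []) then append col to its list
def pvStepA (d : List (String × List String)) (col : String) : List (String × List String) :=
  match pvParse col with
  | none => d
  | some info =>
    let d1 := if d.any (fun q => q.1 == info.1) then d else d ++ [(info.1, [])]
    d1.map (fun q => if q.1 == info.1 then (q.1, q.2 ++ [col]) else q)

def get_analyzer_columns_by_source (columns : List String) : List (String × List String) :=
  columns.foldl pvStepA []

-- ===== PORT B =====
-- pair(c) of Source B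
def pvPairOf (c : String) : Option (String × String) :=
  match PySem.Str.split? c "__" with
  | some [a, _, _] => some (a, c)
  | _ => none

-- [c for t, c in pairs if t == s]
def pvGather (pairs : List (String × String)) (s : String) : List String :=
  pairs.filterMap (fun p => if p.1 == s then some p.2 else none)

def get_analyzer_columns_by_source_alt (columns : List String) : List (String × List String) :=
  let pairs := columns.filterMap pvPairOf
  let order := PySem.List.dedup (pairs.map Prod.fst)   -- dict.fromkeys
  order.map (fun s => (s, pvGather pairs s))

-- ===== PRECONDITION & SPEC =====
def Spec_get_analyzer_columns_by_source (columns : List String) (out : List (String × List String)) : Prop := out = get_analyzer_columns_by_source_alt columns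
instance (columns : List String) (out : List (String × List String)) : Decidable (Spec_get_analyzer_columns_by_source columns out) := by unfold Spec_get_analyzer_columns_by_source; infer_instance

-- ===== CLAIM (what is proved, stated in full; the proofs are below) =====
def Claim_equal_get_analyzer_columns_by_source : Prop := ∀ (columns : List String), Dom_get_analyzer_columns_by_source columns → Spec_get_analyzer_columns_by_source columns (get_analyzer_columns_by_source columns)

-- ===== LEMMAS AND PROOFS =====

-- ordered dedup of xs relative to an already-seen key list
def pvNew (seen : List String) (xs : List String) : List String :=
  match xs with
  | [] => []
  | x :: r => if seen.contains x then pvNew seen r else x :: pvNew (seen ++ [x]) r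

-- A's fold, restricted to the pairs it actually uses
def pvStepP (d : List (String × List String)) (p : String × String) : List (String × List String) :=
  let d1 := if d.any (fun q => q.1 == p.1) then d else d ++ [(p.1, [])]
  d1.map (fun q => if q.1 == p.1 then (q.1, q.2 ++ [p.2]) else q)

lemma pvFoldA_eq_foldP (cols : List String) (d : List (String × List String)) :
    cols.foldl pvStepA d = (cols.filterMap pvPairOf).foldl pvStepP d := by
  induction cols generalizing d with
  | nil => rfl
  | cons c r ih =>
    simp only [List.foldl_cons, List.filterMap_cons]
    have : pvStepA d c = (match pvPairOf c with
        | none => d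
        | some p => pvStepP d p) := by
      unfold pvStepA pvPairOf pvParse
      rcases h : PySem.Str.split? c "__" with _ | (_ | ⟨a, _ | ⟨b, _ | ⟨e, _ | _⟩⟩⟩) <;> rfl
    rcases h : pvPairOf c with _ | p <;> simp [h] at this <;> simp [this, ih]

lemma pvGather_cons (p : String × String) (ps : List (String × String)) (s : String) :
    pvGather (p :: ps) s = if p.1 = s then p.2 :: pvGather ps s else pvGather ps s := by
  simp [pvGather, List.filterMap_cons]
  split <;> simp_all

lemma pvNew_not_mem {seen xs : List String} {t : String} (h : t ∈ pvNew seen xs) : t ∉ seen := by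
  induction xs generalizing seen with
  | nil => simp [pvNew] at h
  | cons x r ih =>
    simp only [pvNew] at h
    split at h
    · exact ih h
    · rcases List.mem_cons.mp h with rfl | h
      · simpa using ‹¬ (seen.contains t = true)›
      · intro hmem; exact ih h (by simp [hmem])

lemma pvFoldAdd_eq (xs ks : List String) :
    xs.foldl PySem.Set.add ks = ks ++ pvNew ks xs := by
  induction xs generalizing ks with
  | nil => simp [pvNew]
  | cons x r ih =>
    simp only [List.foldl_cons, PySem.Set.add, PySem.Set.contains, pvNew]
    by_cases hx : ks.contains x = true
    · rw [if_pos hx, if_pos hx, ih]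
    · rw [if_neg hx, if_neg hx, ih (ks ++ [x])]
      simp

lemma pvMain (ps : List (String × String)) (d : List (String × List String))
    (hd : (d.map Prod.fst).Nodup) :
    ps.foldl pvStepP d =
      d.map (fun q => (q.1, q.2 ++ pvGather ps q.1)) ++
      (pvNew (d.map Prod.fst) (ps.map Prod.fst)).map (fun s => (s, pvGather ps s)) := by
  induction ps generalizing d with
  | nil => simp [pvGather, pvNew]
  | cons p rest ih =>
    obtain ⟨s, c⟩ := p
    simp only [List.foldl_cons, List.map_cons, pvNew]
    by_cases hs : s ∈ d.map Prod.fst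
    · -- existing key: membership test succeeds, append in place
      have hany : d.any (fun q => q.1 == s) = true := by
        simp only [List.any_eq_true, beq_iff_eq]
        obtain ⟨q, hq, hq1⟩ := List.mem_map.mp hs
        exact ⟨q, hq, hq1⟩
      have hstep : pvStepP d (s, c) = d.map (fun q => if q.1 = s then (q.1, q.2 ++ [c]) else q) := by
        simp [pvStepP, hany]
      rw [hstep]
      have hkeys : ((d.map (fun q => if q.1 = s then (q.1, q.2 ++ [c]) else q)).map Prod.fst)
          = d.map Prod.fst := by
        simp only [List.map_map]; apply List.map_congr_left; intro q _
        by_cases h : q.1 = s <;> simp [h]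
      rw [ih _ (by rw [hkeys]; exact hd), hkeys]
      have hcontains : (d.map Prod.fst).contains s = true := by simpa using hs
      rw [if_pos hcontains]
      congr 1
      · rw [List.map_map]
        apply List.map_congr_left; intro q _
        by_cases h : q.1 = s
        · simp [h, pvGather_cons, Function.comp]
        · have h' : ¬ s = q.1 := fun he => h he.symm
          simp [h, h', pvGather_cons, Function.comp]
      · apply List.map_congr_left; intro t ht
        have hts : t ≠ s := fun he => pvNew_not_mem ht (he ▸ hs)
        simp [pvGather_cons, Ne.symm hts]
    · -- new key: inserted at the end with [], then appended
      have hany : d.any (fun q => q.1 == s) = false := by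
        simp only [List.any_eq_false, beq_iff_eq]
        intro q hq he; exact hs (List.mem_map.mpr ⟨q, hq, he⟩)
      have hstep : pvStepP d (s, c) = d ++ [(s, [c])] := by
        simp only [pvStepP, hany, Bool.false_eq_true, if_false, List.map_append]
        have hid : ∀ q ∈ d, (if (q.1 == s) = true then (q.1, q.2 ++ [c]) else q) = q := by
          intro q hq
          have : q.1 ≠ s := fun he => hs (List.mem_map.mpr ⟨q, hq, he⟩)
          simp [this]
        rw [List.map_congr_left hid]
        simp
      rw [hstep]
      have hkeys : ((d ++ [(s, [c])]).map Prod.fst) = d.map Prod.fst ++ [s] := by simp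
      have hnd : (((d ++ [(s, [c])]).map Prod.fst)).Nodup := by
        rw [hkeys, List.nodup_append]
        refine ⟨hd, List.nodup_singleton s, ?_⟩
        intro a ha b hb
        rw [List.mem_singleton] at hb
        subst hb
        exact fun he => hs (he ▸ ha)
      rw [ih _ hnd, hkeys]
      have hcontains : (d.map Prod.fst).contains s = false := by simpa using hs
      rw [hcontains]
      have e1 : List.map (fun q => (q.1, q.2 ++ pvGather rest q.1)) d
          = List.map (fun q => (q.1, q.2 ++ pvGather ((s, c) :: rest) q.1)) d := by
        apply List.map_congr_left; intro q hq
        have : q.1 ≠ s := fun he => hs (List.mem_map.mpr ⟨q, hq, he⟩)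
        simp [pvGather_cons, Ne.symm this]
      have e2 : List.map (fun t => (t, pvGather rest t))
            (pvNew (List.map Prod.fst d ++ [s]) (List.map Prod.fst rest))
          = List.map (fun t => (t, pvGather ((s, c) :: rest) t))
            (pvNew (List.map Prod.fst d ++ [s]) (List.map Prod.fst rest)) := by
        apply List.map_congr_left; intro t ht
        have hts : t ≠ s := by
          have := pvNew_not_mem ht; intro he; exact this (by simp [he])
        simp [pvGather_cons, Ne.symm hts]
      have e3 : pvGather ((s, c) :: rest) s = c :: pvGather rest s := by
        simp [pvGather_cons]
      simp only [List.map_append, List.map_cons, List.map_nil, e1, e2]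
      simp [e3.symm]

-- ===== VERDICT (by name: the statement is the Claim_ definition above) =====
theorem get_analyzer_columns_by_source_spec : Claim_equal_get_analyzer_columns_by_source := by
  intro columns _
  unfold Spec_get_analyzer_columns_by_source get_analyzer_columns_by_source
    get_analyzer_columns_by_source_alt
  rw [pvFoldA_eq_foldP, pvMain _ _ (by simp)]
  simp [PySem.List.dedup, PySem.Set.ofList, PySem.Set.empty, pvFoldAdd_eq]
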